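-- pv_equiv track=rewrite | github.com/DeadLekar/news | news_parser.py | get_stamina
-- ===== SOURCE A (Python) =====
-- def get_stamina(words_rows):
--     flexes = []
--     words = []
--     short = words_rows[0][0]
--     for w_row in words_rows:
--         if len(w_row[0]) < len(short):
--             short = w_row[0]
--         words.append(w_row[0])
--     if len(words) > 1:
--         while len(short) > 0:
--             flg_cut = False
--             for word in words:
--                 while not short in word:
--                     short = short[:-1]
--                     flg_cut = True
--             if not flg_cut: break
--         else:
--             pass
--
--         if short:
--             for word in words:
--                 flex = word[len(short):]
--                 if flex not in flexes:
--                     flexes.append(flex)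
--
--     return short, flexes
-- ===== SOURCE B (Python) =====
-- def get_stamina(words_rows):
--     words = [row[0] for row in words_rows]
--     short = min(words, key=len)
--     if len(words) == 1:
--         return short, []
--     # binary search the largest prefix length k of `short` such that
--     # short[:k] is a substring of every word
--     lo, hi = 0, len(short)
--     while lo < hi:
--         mid = (lo + hi + 1) // 2
--         p = short[:mid]
--         if all(p in w for w in words):
--             lo = mid
--         else:
--             hi = mid - 1
--     short = short[:lo]
--     if not short:
--         return short, []
--     flexes = list(dict.fromkeys(w[lo:] for w in words))
--     return short, flexes
-- ===== Notes on version B (the rewrite author's own statement) =====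
-- stated objective: alternative
-- what changed: Replaces A's repeated chop-one-character-and-rescan while-loops by a single binary search on the common-prefix length (checking short[:mid] in every word), min(words, key=len) for the shortest first-column word, and dict.fromkeys for the ordered dedup of the flexes.
import Mathlib
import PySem

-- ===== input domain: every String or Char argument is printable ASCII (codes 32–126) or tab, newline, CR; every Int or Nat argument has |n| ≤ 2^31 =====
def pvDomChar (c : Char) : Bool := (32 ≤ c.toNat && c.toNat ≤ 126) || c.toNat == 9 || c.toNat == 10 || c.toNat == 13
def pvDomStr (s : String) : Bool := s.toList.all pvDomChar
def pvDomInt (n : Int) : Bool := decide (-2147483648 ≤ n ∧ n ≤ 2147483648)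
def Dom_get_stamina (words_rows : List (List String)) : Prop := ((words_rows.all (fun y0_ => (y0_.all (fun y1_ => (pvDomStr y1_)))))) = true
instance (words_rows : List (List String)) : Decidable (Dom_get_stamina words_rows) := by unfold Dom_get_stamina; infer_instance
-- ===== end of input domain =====

-- B replaces A's repeated chop-one-char-and-rescan loop by one binary search on the
-- prefix length (checking `short[:mid] in every word`) plus one dedup pass for the flexes.

-- ===== PORT A =====

-- inner `while not short in word: short = short[:-1]; flg_cut = True`
def pvCutF (short word : List Char) (flg : Bool) : List Char × Bool :=
  if PySem.Chars.isIn short word then (short, flg)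
  else pvCutF (PySem.List.slice short none (some (-1))) word true
termination_by short.length
decreasing_by
  rename_i h
  have hne : short ≠ [] := by rintro rfl; simp [PySem.Chars.isIn_nil] at h
  have := List.length_pos_of_ne_nil hne
  simp only [PySem.List.slice_to_neg_one, List.length_dropLast]
  omega

-- `for word in words: <inner while>` threading (short, flg_cut)
def pvPass (words : List (List Char)) (st : List Char × Bool) : List Char × Bool :=
  words.foldl (fun st word => pvCutF st.1 word st.2) st

-- spec of one pass, needed already for pvOuter's termination
theorem pvCutF_spec (short word : List Char) (flg : Bool) :
    (pvCutF short word flg).1 <+: short ∧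
    PySem.Chars.isIn (pvCutF short word flg).1 word = true ∧
    (∀ t, t <+: short → PySem.Chars.isIn t word = true → t <+: (pvCutF short word flg).1) ∧
    ((pvCutF short word flg).2 = false → flg = false ∧ (pvCutF short word flg).1 = short) ∧
    ((pvCutF short word flg).1 = short → (pvCutF short word flg).2 = flg) := by
  induction short, flg using pvCutF.induct word with
  | case1 short flg h =>
      rw [pvCutF, if_pos h]
      exact ⟨List.prefix_refl _, h, fun t ht _ => ht, fun h2 => ⟨h2, rfl⟩, fun _ => rfl⟩
  | case2 short flg h ih =>
      have hne : short ≠ [] := by rintro rfl; simp [PySem.Chars.isIn_nil] at h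
      rw [pvCutF, if_neg h]
      simp only [PySem.List.slice_to_neg_one] at ih ⊢
      obtain ⟨ih1, ih2, ih3, ih4, ih5⟩ := ih
      have hdl : short.dropLast <+: short := List.dropLast_prefix short
      have hlt : short.dropLast.length < short.length := by
        have := List.length_pos_of_ne_nil hne
        simp only [List.length_dropLast]; omega
      refine ⟨ih1.trans hdl, ih2, ?_, ?_, ?_⟩
      · intro t ht hin
        have htne : t ≠ short := by rintro rfl; exact absurd hin (by simpa using h)
        obtain ⟨u, rfl⟩ := ht
        have hu : u ≠ [] := by rintro rfl; simp at htne
        refine ih3 t ⟨u.dropLast, ?_⟩ hin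
        rw [List.dropLast_append_of_ne_nil hu]
      · intro h2; exact absurd ((ih4 h2).1) (by simp)
      · intro h1
        have hle := ih1.length_le
        rw [h1] at hle
        exact absurd hle (by omega)

theorem pvPass_spec (words : List (List Char)) (short : List Char) (flg : Bool) :
    (pvPass words (short, flg)).1 <+: short ∧
    (∀ w ∈ words, PySem.Chars.isIn (pvPass words (short, flg)).1 w = true) ∧
    (∀ t, t <+: short → (∀ w ∈ words, PySem.Chars.isIn t w = true) →
        t <+: (pvPass words (short, flg)).1) ∧
    ((pvPass words (short, flg)).2 = false → flg = false ∧ (pvPass words (short, flg)).1 = short) ∧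
    ((pvPass words (short, flg)).1 = short → (pvPass words (short, flg)).2 = flg) := by
  induction words generalizing short flg with
  | nil =>
      exact ⟨List.prefix_refl _, by simp, fun t ht _ => ht, fun h2 => ⟨h2, rfl⟩, fun _ => rfl⟩
  | cons w ws ih =>
      obtain ⟨c1, c2, c3, c4, c5⟩ := pvCutF_spec short w flg
      have hstep : pvPass (w :: ws) (short, flg)
          = pvPass ws ((pvCutF short w flg).1, (pvCutF short w flg).2) := by
        simp [pvPass]
      obtain ⟨i1, i2, i3, i4, i5⟩ := ih (pvCutF short w flg).1 (pvCutF short w flg).2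
      rw [hstep]
      refine ⟨i1.trans c1, ?_, ?_, ?_, ?_⟩
      · intro w' hw'
        rcases List.mem_cons.mp hw' with rfl | hw'
        · -- the final short is a prefix of the one that was checked against w'
          rw [PySem.Chars.isIn_iff_infix] at c2 ⊢
          exact (List.IsPrefix.isInfix i1).trans c2
        · exact i2 w' hw'
      · intro t ht hall
        exact i3 t (c3 t ht (hall w (List.mem_cons_self))) (fun w' hw' => hall w' (List.mem_cons_of_mem w hw'))
      · intro h2
        obtain ⟨hc2, heq⟩ := i4 h2
        obtain ⟨hf, heq'⟩ := c4 hc2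
        exact ⟨hf, heq.trans heq'⟩
      · intro h1
        have hle1 := i1.length_le
        have hle2 := c1.length_le
        have h1len : (pvPass ws ((pvCutF short w flg).1, (pvCutF short w flg).2)).1.length
            = short.length := by rw [h1]
        have hceq : (pvCutF short w flg).1 = short := c1.eq_of_length (by omega)
        have hpeq : (pvPass ws ((pvCutF short w flg).1, (pvCutF short w flg).2)).1
            = (pvCutF short w flg).1 := i1.eq_of_length (by omega)
        rw [i5 hpeq, c5 hceq]

-- outer `while len(short) > 0: … if not flg_cut: break`
def pvOuter (words : List (List Char)) (short : List Char) : List Char :=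
  if 0 < short.length then
    let r := pvPass words (short, false)
    if r.2 then pvOuter words r.1 else r.1
  else short
termination_by short.length
decreasing_by
  rename_i hlen hflg
  obtain ⟨h1, _, _, _, h5⟩ := pvPass_spec words short false
  have hne : (pvPass words (short, false)).1 ≠ short := by
    intro h; rw [h5 h] at hflg; exact absurd hflg (by simp)
  have hle := h1.length_le
  have : (pvPass words (short, false)).1.length ≠ short.length := fun h =>
    hne (h1.eq_of_length h)
  omega

def get_stamina (words_rows : List (List String)) : String × List String :=
  let short0 := (PySem.List.pyGetD (PySem.List.pyGetD words_rows 0 []) 0 "").toList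
  let st := words_rows.foldl
    (fun (st : List Char × List (List Char)) w_row =>
      let w := (PySem.List.pyGetD w_row 0 "").toList
      (if PySem.List.len w < PySem.List.len st.1 then w else st.1, st.2 ++ [w]))
    (short0, [])
  let words := st.2
  if 1 < PySem.List.len words then
    let short := pvOuter words st.1
    let flexes : List String :=
      if short.isEmpty then []
      else
        words.foldl (fun fl w =>
          let flex := String.ofList (PySem.List.slice w (some (PySem.List.len short)) none)
          if fl.contains flex then fl else fl ++ [flex]) []
    (String.ofList short, flexes)
  else (String.ofList st.1, [])

-- ===== PORT B =====

-- `all(p in w for w in words)`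
def pvAllIn (p : List Char) (words : List (List Char)) : Bool :=
  words.all (fun w => PySem.Chars.isIn p w)

-- binary search for the largest k with short[:k] a substring of every word
def pvBS (short : List Char) (words : List (List Char)) (lo hi : Int) : Int :=
  if lo < hi then
    let mid := PySem.Int.floordiv (lo + hi + 1) 2
    if pvAllIn (PySem.List.slice short none (some mid)) words then pvBS short words mid hi
    else pvBS short words lo (mid - 1)
  else lo
termination_by (hi - lo).toNat
decreasing_by
  all_goals
    rename_i h _
    rw [PySem.Int.floordiv_eq_ediv_of_pos (by norm_num)]
    omega

def get_stamina_alt (words_rows : List (List String)) : String × List String :=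
  let words := words_rows.map (fun row => (PySem.List.pyGetD row 0 "").toList)
  let short := PySem.List.minD words (fun w => PySem.List.len w) []
  if PySem.List.len words == 1 then (String.ofList short, [])
  else
    let lo := pvBS short words 0 (PySem.List.len short)
    let shortP := PySem.List.slice short none (some lo)
    if shortP.isEmpty then (String.ofList shortP, [])
    else
      (String.ofList shortP,
       PySem.List.dedup (words.map (fun w => String.ofList (PySem.List.slice w (some lo) none))))

-- ===== PRECONDITION & SPEC =====
-- Python A raises IndexError on an empty words_rows and on any empty row (w_row[0]); Pre_ excludes exactly those.
def Pre_get_stamina (words_rows : List (List String)) : Prop :=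
  words_rows ≠ [] ∧ ∀ row ∈ words_rows, row ≠ []
instance (words_rows : List (List String)) : Decidable (Pre_get_stamina words_rows) := by
  unfold Pre_get_stamina; infer_instance
def pvWitness_get_stamina : List (List String) := [["abac"], ["bab"], ["abc", "zz"]]

def Spec_get_stamina (words_rows : List (List String)) (out : String × List String) : Prop := out = get_stamina_alt words_rows
instance (words_rows : List (List String)) (out : String × List String) : Decidable (Spec_get_stamina words_rows out) := by unfold Spec_get_stamina; infer_instance

-- ===== CLAIM (what is proved, stated in full; the proofs are below) =====
def Claim_equal_get_stamina : Prop := ∀ (words_rows : List (List String)), Dom_get_stamina words_rows → Pre_get_stamina words_rows → Spec_get_stamina words_rows (get_stamina words_rows)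

-- ===== LEMMAS AND PROOFS =====

-- a prefix of a common substring is a common substring
theorem pvAllIn_mono {t p : List Char} (ws : List (List Char)) (h : t <+: p)
    (hp : pvAllIn p ws = true) : pvAllIn t ws = true := by
  rw [pvAllIn, List.all_eq_true] at hp ⊢
  intro w hw
  have hw' : PySem.Chars.isIn p w = true := by simpa using hp w hw
  rw [PySem.Chars.isIn_iff_infix] at hw' ⊢
  exact (List.IsPrefix.isInfix h).trans hw'

theorem pvOuter_spec (words : List (List Char)) (short : List Char) :
    pvOuter words short <+: short ∧
    pvAllIn (pvOuter words short) words = true ∧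
    (∀ t, t <+: short → pvAllIn t words = true → t <+: pvOuter words short) := by
  induction short using pvOuter.induct words with
  | case1 short hlen r hflg ih =>
      obtain ⟨p1, p2, p3, _, _⟩ := pvPass_spec words short false
      have hr : pvPass words (short, false) = r := rfl
      rw [hr] at p1 p2 p3
      obtain ⟨i1, i2, i3⟩ := ih
      rw [pvOuter, if_pos hlen]
      show (if r.2 = true then pvOuter words r.1 else r.1) <+: short ∧
        pvAllIn (if r.2 = true then pvOuter words r.1 else r.1) words = true ∧
        (∀ t, t <+: short → pvAllIn t words = true →
          t <+: (if r.2 = true then pvOuter words r.1 else r.1))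
      rw [if_pos hflg]
      refine ⟨i1.trans p1, i2, fun t ht hall => ?_⟩
      refine i3 t (p3 t ht ?_) hall
      rw [pvAllIn, List.all_eq_true] at hall
      exact fun w hw => by simpa using hall w hw
  | case2 short hlen r hflg =>
      obtain ⟨p1, p2, p3, p4, _⟩ := pvPass_spec words short false
      have hr : pvPass words (short, false) = r := rfl
      rw [hr] at p1 p2 p3 p4
      rw [pvOuter, if_pos hlen]
      show (if r.2 = true then pvOuter words r.1 else r.1) <+: short ∧
        pvAllIn (if r.2 = true then pvOuter words r.1 else r.1) words = true ∧
        (∀ t, t <+: short → pvAllIn t words = true →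
          t <+: (if r.2 = true then pvOuter words r.1 else r.1))
      rw [if_neg hflg]
      obtain ⟨_, heq⟩ := p4 (by simpa using hflg)
      refine ⟨p1, ?_, fun t ht _ => by rw [heq]; exact ht⟩
      rw [pvAllIn, List.all_eq_true]
      exact fun w hw => by simpa using p2 w hw
  | case3 short hlen =>
      have hnil : short = [] := List.eq_nil_of_length_eq_zero (by omega)
      subst hnil
      rw [pvOuter, if_neg hlen]
      refine ⟨List.prefix_refl _, ?_, fun t ht _ => ht⟩
      rw [pvAllIn, List.all_eq_true]
      exact fun w _ => by simpa using PySem.Chars.isIn_nil w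

theorem pvBS_spec (s : List Char) (ws : List (List Char)) (lo hi : Int)
    (h0 : 0 ≤ lo) (hlh : lo ≤ hi) (hhL : hi ≤ (s.length : Int))
    (hP : pvAllIn (s.take lo.toNat) ws = true)
    (hN : ∀ j : Nat, hi < (j : Int) → j ≤ s.length → pvAllIn (s.take j) ws = false) :
    lo ≤ pvBS s ws lo hi ∧ pvBS s ws lo hi ≤ (s.length : Int) ∧
    pvAllIn (s.take (pvBS s ws lo hi).toNat) ws = true ∧
    (∀ j : Nat, pvBS s ws lo hi < (j : Int) → j ≤ s.length → pvAllIn (s.take j) ws = false) := by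
  induction lo, hi using pvBS.induct s ws with
  | case1 lo hi hlt mid htest ih =>
      have hmiddef : mid = PySem.Int.floordiv (lo + hi + 1) 2 := rfl
      have hmid : lo < mid ∧ mid ≤ hi := by
        rw [hmiddef, PySem.Int.floordiv_eq_ediv_of_pos (by norm_num)]
        omega
      have hbs : pvBS s ws lo hi = pvBS s ws mid hi := by
        rw [pvBS, if_pos hlt]
        show (if pvAllIn (PySem.List.slice s none (some mid)) ws = true
              then pvBS s ws mid hi else pvBS s ws lo (mid - 1)) = _
        rw [if_pos htest]
      rw [hbs]
      have hslice : PySem.List.slice s none (some mid) = s.take mid.toNat :=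
        PySem.List.slice_to s (by omega)
      rw [hslice] at htest
      have := ih (by omega) (by omega) hhL htest hN
      exact ⟨by omega, this.2.1, this.2.2.1, this.2.2.2⟩
  | case2 lo hi hlt mid htest ih =>
      have hmiddef : mid = PySem.Int.floordiv (lo + hi + 1) 2 := rfl
      have hmid : lo < mid ∧ mid ≤ hi := by
        rw [hmiddef, PySem.Int.floordiv_eq_ediv_of_pos (by norm_num)]
        omega
      have hbs : pvBS s ws lo hi = pvBS s ws lo (mid - 1) := by
        rw [pvBS, if_pos hlt]
        show (if pvAllIn (PySem.List.slice s none (some mid)) ws = true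
              then pvBS s ws mid hi else pvBS s ws lo (mid - 1)) = _
        rw [if_neg htest]
      rw [hbs]
      have hslice : PySem.List.slice s none (some mid) = s.take mid.toNat :=
        PySem.List.slice_to s (by omega)
      rw [hslice] at htest
      have hN' : ∀ j : Nat, mid - 1 < (j : Int) → j ≤ s.length → pvAllIn (s.take j) ws = false := by
        intro j hj hjL
        by_cases hj2 : hi < (j : Int)
        · exact hN j hj2 hjL
        · -- mid ≤ j ≤ hi : a true answer at j would make mid true by monotonicity
          by_contra hcon
          have hjt : pvAllIn (s.take j) ws = true := by
            cases h : pvAllIn (s.take j) ws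
            · exact absurd h hcon
            · rfl
          have hmidt : pvAllIn (s.take mid.toNat) ws = true := by
            refine pvAllIn_mono ws ?_ hjt
            rw [List.prefix_iff_eq_take, List.length_take, List.take_take]
            congr 1
            omega
          exact absurd hmidt (by simpa using htest)
      exact ih (by omega) (by omega) (by omega) hP hN'
  | case3 lo hi hlt =>
      rw [pvBS, if_neg hlt]
      exact ⟨le_refl _, by omega, hP, fun j hj hjL => hN j (by omega) hjL⟩

-- A's whole while-loop computes exactly the binary-search prefix
theorem pvOuter_eq_pvBS (ws : List (List Char)) (s : List Char) :
    pvOuter ws s = PySem.List.slice s none (some (pvBS s ws 0 (PySem.List.len s))) := by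
  have hL : PySem.List.len s = (s.length : Int) := PySem.List.len_eq s
  rw [hL]
  obtain ⟨o1, o2, o3⟩ := pvOuter_spec ws s
  have hP0 : pvAllIn (s.take (0 : Int).toNat) ws = true := by
    rw [pvAllIn, List.all_eq_true]
    exact fun w _ => by simpa using PySem.Chars.isIn_nil w
  have hN0 : ∀ j : Nat, (s.length : Int) < (j : Int) → j ≤ s.length → pvAllIn (s.take j) ws = false := by
    intro j hj hjL; omega
  obtain ⟨b1, b2, b3, b4⟩ := pvBS_spec s ws 0 (s.length) (le_refl 0) (by omega) (by omega) hP0 hN0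
  set R := pvBS s ws 0 (s.length : Int) with hR
  have hRc : ((R.toNat : Int)) = R := by omega
  have hslice : PySem.List.slice s none (some R) = s.take R.toNat :=
    PySem.List.slice_to s b1
  rw [hslice]
  have hr_take : pvOuter ws s = s.take (pvOuter ws s).length :=
    List.prefix_iff_eq_take.mp o1
  have hle1 : R.toNat ≤ (pvOuter ws s).length := by
    have hpre : s.take R.toNat <+: pvOuter ws s := o3 _ (List.take_prefix _ _) b3
    have := hpre.length_le
    rw [List.length_take] at this
    omega
  have hle2 : (pvOuter ws s).length ≤ R.toNat := by
    by_contra hcon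
    have hlen : (pvOuter ws s).length ≤ s.length := o1.length_le
    have := b4 (pvOuter ws s).length (by omega) hlen
    rw [← hr_take] at this
    rw [o2] at this
    exact absurd this (by simp)
  rw [hr_take]
  congr 1
  omega

-- A's running-minimum scan is Python's min(words, key=len)
theorem pvMin_fold (xs : List (List Char)) (s : List Char) :
    xs.foldl (fun m w => if PySem.List.len w < PySem.List.len m then w else m) s
      = (xs.foldl (fun acc w =>
          match acc with
          | none => some w
          | some m => if PySem.List.len w < PySem.List.len m then some w else some m)
          (some s)).getD [] := by
  induction xs generalizing s with
  | nil => rfl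
  | cons x xs ih =>
      simp only [List.foldl_cons]
      show _ = (List.foldl _
          (if PySem.List.len x < PySem.List.len s then some x else some s) xs).getD []
      by_cases h : PySem.List.len x < PySem.List.len s
      · rw [if_pos h, if_pos h]; exact ih x
      · rw [if_neg h, if_neg h]; exact ih s

-- A's whole first loop (running minimum over the first column)
theorem pvShort_eq (r0 : List String) (rest : List (List String)) :
    (r0 :: rest).foldl
      (fun m w_row =>
        let w := (PySem.List.pyGetD w_row 0 "").toList
        if PySem.List.len w < PySem.List.len m then w else m)
      ((PySem.List.pyGetD r0 0 "").toList)
    = PySem.List.minD ((r0 :: rest).map (fun row => (PySem.List.pyGetD row 0 "").toList))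
        (fun w => PySem.List.len w) [] := by
  unfold PySem.List.minD PySem.List.min?
  simp only [List.map_cons, List.foldl_cons]
  show (rest.foldl _
      (if PySem.List.len ((PySem.List.pyGetD r0 0 "").toList)
            < PySem.List.len ((PySem.List.pyGetD r0 0 "").toList)
        then (PySem.List.pyGetD r0 0 "").toList else (PySem.List.pyGetD r0 0 "").toList)) = _
  rw [if_neg (lt_irrefl _)]
  have h := pvMin_fold (rest.map (fun row => (PySem.List.pyGetD row 0 "").toList))
      ((PySem.List.pyGetD r0 0 "").toList)
  rw [List.foldl_map] at h
  rw [h]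
  congr 1
  refine List.foldl_ext _ _ _ (fun acc w _ => ?_)
  cases acc <;> rfl

-- splitting A's paired fold into its two independent components
theorem pvFold_pair (rows : List (List String)) (s0 : List Char) (acc : List (List Char)) :
    rows.foldl
      (fun (st : List Char × List (List Char)) w_row =>
        let w := (PySem.List.pyGetD w_row 0 "").toList
        (if PySem.List.len w < PySem.List.len st.1 then w else st.1, st.2 ++ [w]))
      (s0, acc)
    = (rows.foldl
        (fun m w_row =>
          let w := (PySem.List.pyGetD w_row 0 "").toList
          if PySem.List.len w < PySem.List.len m then w else m) s0,
       acc ++ rows.map (fun row => (PySem.List.pyGetD row 0 "").toList)) := by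
  induction rows generalizing s0 acc with
  | nil => simp
  | cons r rows ih =>
      simp only [List.foldl_cons, List.map_cons]
      rw [ih]
      simp

-- A's if-not-in-append loop is dict.fromkeys dedup of the mapped list
theorem pvFlex_fold (ws : List (List Char)) (g : List Char → String) :
    ws.foldl (fun fl w =>
        let flex := g w
        if fl.contains flex then fl else fl ++ [flex]) []
      = PySem.List.dedup (ws.map g) := by
  rw [PySem.List.dedup_eq_ofList, ← PySem.Set.update_nil_left,
      PySem.Set.update_map_eq_foldl_add]
  rfl

-- ===== VERDICT (by name: the statement is the Claim_ definition above) =====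
theorem get_stamina_spec : Claim_equal_get_stamina := by
  intro rows _ hpre
  obtain ⟨hne, _⟩ := hpre
  cases rows with
  | nil => exact absurd rfl hne
  | cons r0 rest =>
  unfold Spec_get_stamina get_stamina get_stamina_alt
  simp only [pvFold_pair, List.nil_append]
  set f : List String → List Char := fun row => (PySem.List.pyGetD row 0 "").toList with hf
  have hget0 : PySem.List.pyGetD (r0 :: rest) 0 ([] : List String) = r0 :=
    PySem.List.pyGetD_zero_cons r0 rest []
  rw [hget0, pvShort_eq r0 rest]
  set s0 := PySem.List.minD ((r0 :: rest).map f) (fun w => PySem.List.len w) [] with hs0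
  set ws := (r0 :: rest).map f with hws
  -- branch on the number of words
  have hlen : PySem.List.len ws = (ws.length : Int) := PySem.List.len_eq ws
  have hws1 : 0 < ws.length := by rw [hws]; simp
  by_cases hone : ws.length = 1
  · rw [if_neg (show ¬((1 : Int) < PySem.List.len ws) from by rw [hlen, hone]; omega)]
    rw [if_pos (show (PySem.List.len ws == 1) = true from by
      rw [hlen, hone]; simp)]
  · rw [if_pos (show (1 : Int) < PySem.List.len ws from by rw [hlen]; omega)]
    rw [if_neg (show ¬((PySem.List.len ws == 1) = true) from by
      rw [hlen]; simp only [beq_iff_eq]; omega)]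
    rw [pvOuter_eq_pvBS ws s0]
    set R := pvBS s0 ws 0 (PySem.List.len s0) with hRdef
    -- bounds of the binary-search answer
    have hP0 : pvAllIn (s0.take (0 : Int).toNat) ws = true := by
      rw [pvAllIn, List.all_eq_true]
      exact fun w _ => by simpa using PySem.Chars.isIn_nil w
    have hbounds := pvBS_spec s0 ws 0 (s0.length) (le_refl 0) (by omega) (by omega) hP0
      (fun j hj hjL => by omega)
    rw [PySem.List.len_eq] at hRdef
    have hR0 : 0 ≤ R := by rw [hRdef]; exact hbounds.1
    have hRL : R ≤ (s0.length : Int) := by rw [hRdef]; exact hbounds.2.1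
    set sp := PySem.List.slice s0 none (some R) with hsp
    have hlensp : PySem.List.len sp = R := by
      rw [hsp, PySem.List.slice_to s0 hR0, PySem.List.len_eq, List.length_take]
      omega
    by_cases hempty : sp.isEmpty
    · rw [if_pos hempty, if_pos hempty]
    · rw [if_neg hempty, if_neg hempty]
      rw [pvFlex_fold ws (fun w => String.ofList (PySem.List.slice w (some (PySem.List.len sp)) none))]
      rw [hlensp]
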